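-- pv_equiv track=rewrite | github.com/evanmiltenburg/gwc2016-adjective-similarity | ordering.py | order_list2
-- ===== SOURCE A (Python) =====
-- def ranking_for_list(l):
--     """Takes list of scores, returns a list of positions and their ranks.
--
--     Ex: ranking_for_list([1,3,2]) returns [(0, 0), (1, 2), (2, 1)]"""
--     ranking = [item for item,score in sorted(enumerate(l), key=lambda t:t[1])]
--     return list((item,rank) for rank,item in enumerate(ranking))
--
-- def order_list2(preferred, secondary):
--     "Ordering without tie-breaker."
--     posscore   = dict(enumerate(preferred))
--     additional = list(range(len(preferred),len(secondary)))
--     order_secondary = dict(ranking_for_list(secondary))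
--     reverse_order_secondary = dict((rank,pos) for pos,rank in order_secondary.items())
--     additional = sorted(additional,key=lambda pos: order_secondary[pos])
--     for pos in additional:
--         rank = order_secondary[pos]
--         if rank == 0:
--             posscore[pos] = 0
--         else:
--             before        = reverse_order_secondary[rank-1]
--             posscore[pos] = posscore[before]
--     return [rank for pos, rank in sorted(posscore.items())]
-- ===== SOURCE B (Python) =====
-- def order_list2(preferred, secondary):
--     "Ordering without tie-breaker."
--     posscore = {pos: score for pos, score in enumerate(preferred)}
--     ranking = [pos for pos, score in sorted(enumerate(secondary), key=lambda t: t[1])]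
--     carry = 0
--     for pos in ranking:
--         if pos in posscore:
--             carry = posscore[pos]
--         else:
--             posscore[pos] = carry
--     return [posscore[pos] for pos in sorted(posscore)]
-- ===== Notes on version B (the rewrite author's own statement) =====
-- stated objective: simpler
-- what changed: B drops the rank/position dicts (order_secondary, reverse_order_secondary) and the second sort of `additional`: it walks the secondary ranking once with a running carry, filling scores forward (preferred positions update the carry, new positions receive it), so predecessor lookups and the rank==0 special case disappear.
import Mathlib
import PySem

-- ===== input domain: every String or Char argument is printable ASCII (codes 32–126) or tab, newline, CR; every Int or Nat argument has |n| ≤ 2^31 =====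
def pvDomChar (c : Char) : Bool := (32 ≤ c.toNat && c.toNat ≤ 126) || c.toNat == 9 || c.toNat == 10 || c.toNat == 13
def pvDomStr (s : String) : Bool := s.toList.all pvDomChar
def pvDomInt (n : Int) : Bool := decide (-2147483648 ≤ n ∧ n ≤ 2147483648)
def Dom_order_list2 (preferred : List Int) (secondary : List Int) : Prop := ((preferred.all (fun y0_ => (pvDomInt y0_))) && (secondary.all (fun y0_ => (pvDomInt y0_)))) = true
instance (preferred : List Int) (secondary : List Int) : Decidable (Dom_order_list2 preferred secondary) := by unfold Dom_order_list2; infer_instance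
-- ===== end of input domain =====

-- B replaces A's rank/reverse-rank dicts and second sort by a single forward-fill pass with a
-- running carry over the secondary ranking (objective: simpler).

-- ===== PORT A =====
def ranking_for_list (l : List Int) : List (Int × Int) :=
  let ranking := (PySem.List.sorted (PySem.List.enumerate l) (fun t => t.2) false).map (fun t => t.1)
  (PySem.List.enumerate ranking).map (fun p => (p.2, p.1))

def order_list2 (preferred : List Int) (secondary : List Int) : List Int :=
  let posscore0 : PySem.Dict Int Int := PySem.Dict.ofList (PySem.List.enumerate preferred)
  let additional0 : List Int := PySem.List.pyRange (preferred.length : Int) (secondary.length : Int) 1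
  let order_secondary : PySem.Dict Int Int := PySem.Dict.ofList (ranking_for_list secondary)
  let reverse_order_secondary : PySem.Dict Int Int :=
    PySem.Dict.ofList (order_secondary.items.map (fun pr => (pr.2, pr.1)))
  let additional := PySem.List.sorted additional0 (fun pos => order_secondary.getD pos 0) false
  let posscore := additional.foldl (fun ps pos =>
    let rank := order_secondary.getD pos 0
    if rank = 0 then ps.insert pos 0
    else ps.insert pos (ps.getD (reverse_order_secondary.getD (rank - 1) 0) 0)) posscore0
  (PySem.List.sorted2 posscore.items (fun p => p.1) (fun p => p.2) false).map (fun p => p.2)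

-- ===== PORT B =====
def order_list2_alt (preferred : List Int) (secondary : List Int) : List Int :=
  let posscore0 : PySem.Dict Int Int := PySem.Dict.ofList (PySem.List.enumerate preferred)
  let ranking : List Int :=
    (PySem.List.sorted (PySem.List.enumerate secondary) (fun t => t.2) false).map (fun t => t.1)
  let st := ranking.foldl (fun (s : PySem.Dict Int Int × Int) pos =>
    if s.1.contains pos then (s.1, s.1.getD pos 0) else (s.1.insert pos s.2, s.2)) (posscore0, 0)
  (PySem.List.sorted st.1.keys (fun k => k) false).map (fun k => st.1.getD k 0)

-- ===== PRECONDITION & SPEC =====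
def Spec_order_list2 (preferred : List Int) (secondary : List Int) (out : List Int) : Prop := out = order_list2_alt preferred secondary
instance (preferred : List Int) (secondary : List Int) (out : List Int) : Decidable (Spec_order_list2 preferred secondary out) := by unfold Spec_order_list2; infer_instance

-- ===== CLAIM (what is proved, stated in full; the proofs are below) =====
def Claim_equal_order_list2 : Prop := ∀ (preferred : List Int) (secondary : List Int), Dom_order_list2 preferred secondary → Spec_order_list2 preferred secondary (order_list2 preferred secondary)

-- ===== LEMMAS AND PROOFS =====

-- insertBy only compares elements drawn from S: predicates agreeing on S give the same result
lemma insertBy_congr {α : Type} (p q : α → α → Bool) (S : List α)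
    (h : ∀ a ∈ S, ∀ b ∈ S, p a b = q a b) :
    ∀ (acc : List α) (x : α), x ∈ S → (∀ a ∈ acc, a ∈ S) →
      PySem.List.insertBy p x acc = PySem.List.insertBy q x acc := by
  intro acc
  induction acc with
  | nil => intro x _ _; rfl
  | cons y ys ih =>
    intro x hx hmem
    simp only [PySem.List.insertBy]
    rw [h x hx y (hmem y (by simp))]
    by_cases hq : q x y = true
    · simp [hq]
    · rw [if_neg hq, if_neg hq]
      rw [ih x hx (fun a ha => hmem a (by simp [ha]))]

lemma foldl_insertBy_congr {α : Type} (p q : α → α → Bool) (S : List α)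
    (h : ∀ a ∈ S, ∀ b ∈ S, p a b = q a b) :
    ∀ (xs acc : List α), (∀ a ∈ xs, a ∈ S) → (∀ a ∈ acc, a ∈ S) →
      xs.foldl (fun acc x => PySem.List.insertBy p x acc) acc
        = xs.foldl (fun acc x => PySem.List.insertBy q x acc) acc := by
  intro xs
  induction xs with
  | nil => intro acc _ _; rfl
  | cons x xs ih =>
    intro acc hxs hacc
    simp only [List.foldl_cons]
    rw [insertBy_congr p q S h acc x (hxs x (by simp)) hacc]
    exact ih _ (fun a ha => hxs a (by simp [ha]))
      (fun a ha => by
        rcases (PySem.List.mem_insertBy _ _ _ _).1 ha with rfl | ha'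
        · exact hxs a (by simp)
        · exact hacc a ha')

lemma sorted2_unfold {α : Type} (xs : List α) (k1 k2 : α → Int) :
    PySem.List.sorted2 xs k1 k2 false
      = xs.foldl (fun acc x => PySem.List.insertBy
          (fun a b => decide (k1 a < k1 b) || (!decide (k1 b < k1 a) && decide (k2 a < k2 b))) x acc) [] := rfl

-- sorting pairs (k, g k) lexicographically is sorting by the first component
lemma sorted2_map_fst (K : List Int) (g : Int → Int) :
    PySem.List.sorted2 (K.map (fun k => (k, g k))) (fun p => p.1) (fun p => p.2) false
      = PySem.List.sorted (K.map (fun k => (k, g k))) (fun p => p.1) false := by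
  rw [sorted2_unfold, PySem.List.sorted_eq_foldl_insertBy]
  apply foldl_insertBy_congr _ _ (K.map (fun k => (k, g k)))
  · intro a ha b hb
    rcases List.mem_map.1 ha with ⟨x, _, rfl⟩
    rcases List.mem_map.1 hb with ⟨y, _, rfl⟩
    simp only
    by_cases h1 : x < y
    · simp [h1]
    · by_cases h2 : y < x
      · simp [h1, h2]
      · have hxy : x = y := le_antisymm (not_lt.1 h2) (not_lt.1 h1)
        subst hxy
        simp
  · exact fun a ha => ha
  · intro a ha; simp at ha

-- the filter of a permutation of range 0 m to elements ≥ n is a permutation of range n m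
lemma filter_perm_range (R : List Int) (n m : Int) (hn : 0 ≤ n)
    (h : R.Perm (PySem.List.pyRange 0 m)) :
    (R.filter (fun x => decide (n ≤ x))).Perm (PySem.List.pyRange n m) := by
  have h1 := h.filter (fun x => decide (n ≤ x))
  have h2 : (PySem.List.pyRange 0 m).filter (fun x => decide (n ≤ x)) = PySem.List.pyRange n m := by
    by_cases hmn : m ≤ n
    · have hr : PySem.List.pyRange n m = [] := by
        apply List.eq_nil_iff_forall_not_mem.2
        intro x hx
        have := PySem.List.mem_pyRange_one.1 hx
        omega
      rw [hr]
      apply List.filter_eq_nil_iff.2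
      intro x hx
      have := PySem.List.mem_pyRange_one.1 hx
      simp
      omega
    · have hsplit := PySem.List.pyRange_one_append 0 n m hn (by omega)
      rw [hsplit, List.filter_append]
      have hl : (PySem.List.pyRange 0 n).filter (fun x => decide (n ≤ x)) = [] := by
        apply List.filter_eq_nil_iff.2
        intro x hx
        have := PySem.List.mem_pyRange_one.1 hx
        simp
        omega
      have hr : (PySem.List.pyRange n m).filter (fun x => decide (n ≤ x)) = PySem.List.pyRange n m := by
        apply List.filter_eq_self.2
        intro x hx
        have := PySem.List.mem_pyRange_one.1 hx
        simp
        omega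
      rw [hl, hr, List.nil_append]
  rw [← h2]
  exact h1

lemma range_append_max (n m : Int) (hn : 0 ≤ n) :
    PySem.List.pyRange 0 n ++ PySem.List.pyRange n m = PySem.List.pyRange 0 (max n m) := by
  by_cases hmn : m ≤ n
  · have hr : PySem.List.pyRange n m = [] := by
      apply List.eq_nil_iff_forall_not_mem.2
      intro x hx
      have := PySem.List.mem_pyRange_one.1 hx
      omega
    rw [hr, List.append_nil, max_eq_left hmn]
  · rw [max_eq_right (by omega)]
    exact (PySem.List.pyRange_one_append 0 n m hn (by omega)).symm

-- the two loops: A's predecessor-lookup loop over the additional positions equals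
-- B's carry loop over the whole ranking
lemma loop_eq (ord rev : PySem.Dict Int Int) (n : Int) (R : List Int)
    (hnod : R.Nodup)
    (hord : ∀ (p t : List Int) (x : Int), R = p ++ x :: t → ord.getD x 0 = (p.length : Int))
    (hrev : ∀ (p t : List Int) (x : Int), R = p ++ x :: t → rev.getD ((p.length : Int)) 0 = x)
    (hnn : ∀ x ∈ R, 0 ≤ x) :
    ∀ (t p : List Int) (d : PySem.Dict Int Int) (c : Int),
      R = p ++ t →
      d.keys = PySem.List.pyRange 0 n ++ p.filter (fun x => decide (n ≤ x)) →
      (p = [] → c = 0) →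
      (∀ h : p ≠ [], c = d.getD (p.getLast h) 0) →
      ((t.filter (fun x => decide (n ≤ x))).foldl (fun ps pos =>
          let rank := ord.getD pos 0
          if rank = 0 then ps.insert pos 0
          else ps.insert pos (ps.getD (rev.getD (rank - 1) 0) 0)) d
        = (t.foldl (fun (s : PySem.Dict Int Int × Int) pos =>
            if s.1.contains pos then (s.1, s.1.getD pos 0) else (s.1.insert pos s.2, s.2)) (d, c)).1)
      ∧ (t.foldl (fun (s : PySem.Dict Int Int × Int) pos =>
            if s.1.contains pos then (s.1, s.1.getD pos 0) else (s.1.insert pos s.2, s.2)) (d, c)).1.keys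
          = PySem.List.pyRange 0 n ++ (p ++ t).filter (fun x => decide (n ≤ x)) := by
  intro t
  induction t with
  | nil =>
    intro p d c hR hkeys _ _
    refine ⟨rfl, ?_⟩
    simpa using hkeys
  | cons pos t' ih =>
    intro p d c hR hkeys hc0 hcl
    have hposmem : pos ∈ R := by rw [hR]; simp
    have hposnn : 0 ≤ pos := hnn pos hposmem
    have hposnp : pos ∉ p := by
      rw [hR] at hnod
      rcases List.nodup_append.1 hnod with ⟨_, _, hdisj⟩
      intro hmem
      exact hdisj pos hmem pos (by simp) rfl
    have hcont : d.contains pos = decide (pos < n) := by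
      rw [PySem.Dict.contains_eq_decide_mem_keys, hkeys]
      by_cases hpn : pos < n
      · have hm : pos ∈ PySem.List.pyRange 0 n ++ p.filter (fun x => decide (n ≤ x)) :=
          List.mem_append.2 (Or.inl (PySem.List.mem_pyRange_one.2 ⟨hposnn, hpn⟩))
        simp [hpn, hm]
      · have hm : pos ∉ PySem.List.pyRange 0 n ++ p.filter (fun x => decide (n ≤ x)) := by
          intro hmem
          rcases List.mem_append.1 hmem with hmem | hmem
          · exact hpn (PySem.List.mem_pyRange_one.1 hmem).2
          · exact hposnp (List.mem_of_mem_filter hmem)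
        simp [hpn, hm]
    by_cases hpn : n ≤ pos
    · -- additional position: both loops insert (pos, c)
      have hcontf : d.contains pos = false := by rw [hcont]; simp; omega
      have hrank : ord.getD pos 0 = (p.length : Int) := hord p t' pos hR
      have hbodyA : (let rank := ord.getD pos 0
          if rank = 0 then d.insert pos 0
          else d.insert pos (d.getD (rev.getD (rank - 1) 0) 0)) = d.insert pos c := by
        show (if ord.getD pos 0 = 0 then d.insert pos 0
          else d.insert pos (d.getD (rev.getD (ord.getD pos 0 - 1) 0) 0)) = d.insert pos c
        rcases List.eq_nil_or_concat' p with rfl | ⟨p', a, rfl⟩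
        · rw [hrank]
          simp [hc0 rfl]
        · rw [hrank]
          rw [if_neg (by simp; omega)]
          have hcast : (((p' ++ [a]).length : Nat) : Int) - 1 = ((p'.length : Nat) : Int) := by
            simp
        
          rw [hcast, hrev p' (pos :: t') a (by simpa using hR)]
          have hgl : (p' ++ [a]).getLast (by simp) = a := by simp
          rw [← hgl, ← hcl (by simp)]
      have hA1 : ((pos :: t').filter (fun x => decide (n ≤ x))).foldl (fun ps pos =>
            let rank := ord.getD pos 0
            if rank = 0 then ps.insert pos 0
            else ps.insert pos (ps.getD (rev.getD (rank - 1) 0) 0)) d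
          = (t'.filter (fun x => decide (n ≤ x))).foldl (fun ps pos =>
            let rank := ord.getD pos 0
            if rank = 0 then ps.insert pos 0
            else ps.insert pos (ps.getD (rev.getD (rank - 1) 0) 0)) (d.insert pos c) := by
        have hfilt : (pos :: t').filter (fun x => decide (n ≤ x))
            = pos :: t'.filter (fun x => decide (n ≤ x)) := by simp [hpn]
        rw [hfilt, List.foldl_cons, hbodyA]
      have hB1 : ((pos :: t').foldl (fun (s : PySem.Dict Int Int × Int) pos =>
            if s.1.contains pos then (s.1, s.1.getD pos 0) else (s.1.insert pos s.2, s.2)) (d, c))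
          = (t'.foldl (fun (s : PySem.Dict Int Int × Int) pos =>
            if s.1.contains pos then (s.1, s.1.getD pos 0) else (s.1.insert pos s.2, s.2)) (d.insert pos c, c)) := by
        rw [List.foldl_cons]
        simp only [hcontf, Bool.false_eq_true, if_false]
      have hstep := ih (p ++ [pos]) (d.insert pos c) c
        (by rw [hR]; simp)
        (by rw [PySem.Dict.keys_insert_of_not_contains d c hcontf, hkeys]
            simp [hpn])
        (by intro h; simp at h)
        (by intro _
            have hgl : (p ++ [pos]).getLast (by simp) = pos := by simp
            rw [hgl]
            exact (PySem.Dict.getD_insert_self d pos c 0).symm)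
      refine ⟨?_, ?_⟩
      · rw [hA1, hB1]
        exact hstep.1
      · rw [hB1]
        have h2 := hstep.2
        simpa using h2
    · -- preferred position: A skips it, B only updates the carry
      have hcontt : d.contains pos = true := by rw [hcont]; simp; omega
      have hfilt : (pos :: t').filter (fun x => decide (n ≤ x))
          = t'.filter (fun x => decide (n ≤ x)) := by simp [hpn]
      have hB1 : ((pos :: t').foldl (fun (s : PySem.Dict Int Int × Int) pos =>
            if s.1.contains pos then (s.1, s.1.getD pos 0) else (s.1.insert pos s.2, s.2)) (d, c))
          = (t'.foldl (fun (s : PySem.Dict Int Int × Int) pos =>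
            if s.1.contains pos then (s.1, s.1.getD pos 0) else (s.1.insert pos s.2, s.2)) (d, d.getD pos 0)) := by
        rw [List.foldl_cons]
        simp only [hcontt, if_true]
      have hstep := ih (p ++ [pos]) d (d.getD pos 0)
        (by rw [hR]; simp)
        (by rw [hkeys]; simp [hpn])
        (by intro h; simp at h)
        (by intro _
            have hgl : (p ++ [pos]).getLast (by simp) = pos := by simp
            rw [hgl])
      refine ⟨?_, ?_⟩
      · rw [hfilt, hB1]
        exact hstep.1
      · rw [hB1]
        have h2 := hstep.2
        simpa using h2

-- items of a dict built from a list with distinct keys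
lemma ofList_items {ν : Type} (l : List (Int × ν)) (hnd : (l.map (fun p => p.1)).Nodup) :
    (PySem.Dict.ofList l).items = l := by
  show (l.foldl (fun acc p => acc.insert p.1 p.2) PySem.Dict.empty).items = l
  have := PySem.Dict.items_foldl_insert_fresh l (fun p => p.1) (fun p => p.2) PySem.Dict.empty
    (fun a _ => by simp [PySem.Dict.contains_empty]) hnd
  simpa using this

-- the full equality of the two programs
lemma main_eq (preferred secondary : List Int) :
    order_list2 preferred secondary = order_list2_alt preferred secondary := by
  simp only [order_list2, order_list2_alt, ranking_for_list]
  set n : Int := (preferred.length : Int) with hndef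
  set m : Int := (secondary.length : Int) with hmdef
  set R : List Int :=
    (PySem.List.sorted (PySem.List.enumerate secondary 0) (fun t => t.2) false).map (fun t => t.1)
    with hRdef
  set L : List (Int × Int) := (PySem.List.enumerate R 0).map (fun p => (p.2, p.1)) with hLdef
  set ord : PySem.Dict Int Int := PySem.Dict.ofList L with horddef
  set rev : PySem.Dict Int Int := PySem.Dict.ofList (ord.items.map (fun pr => (pr.2, pr.1))) with hrevdef
  set d0 : PySem.Dict Int Int := PySem.Dict.ofList (PySem.List.enumerate preferred 0) with hd0def
  have hn0 : (0 : Int) ≤ n := by rw [hndef]; positivity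
  have hRperm : R.Perm (PySem.List.pyRange 0 m) := by
    have h1 := (PySem.List.sorted_perm (PySem.List.enumerate secondary 0) (fun t => t.2) false).map
      (fun t : Int × Int => t.1)
    rw [PySem.List.map_fst_enumerate] at h1
    simpa [hRdef, hmdef] using h1
  have hRnodup : R.Nodup := hRperm.nodup_iff.2 (PySem.List.nodup_pyRange_one 0 m)
  have hRnn : ∀ x ∈ R, 0 ≤ x := by
    intro x hx
    exact (PySem.List.mem_pyRange_one.1 (hRperm.mem_iff.1 hx)).1
  have hLfst : L.map (fun x => x.1) = R := by
    rw [hLdef, List.map_map]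
    exact PySem.List.map_snd_enumerate R 0
  have horditems : ord.items = L := ofList_items L (by rw [hLfst]; exact hRnodup)
  have hordkeys : ord.keys = R := by
    simp only [PySem.Dict.keys]
    rw [horditems]
    exact hLfst
  have hordnodup : ord.keys.Nodup := by rw [hordkeys]; exact hRnodup
  have hswap : ord.items.map (fun pr => (pr.2, pr.1)) = PySem.List.enumerate R 0 := by
    rw [horditems, hLdef, List.map_map]
    have hid : ((fun pr : Int × Int => (pr.2, pr.1)) ∘ (fun p : Int × Int => (p.2, p.1)))
        = fun p : Int × Int => p := by funext p; rfl
    rw [hid, List.map_id']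
  have hreveq : rev = PySem.Dict.ofList (PySem.List.enumerate R 0) := by rw [hrevdef, hswap]
  have hrevitems : rev.items = PySem.List.enumerate R 0 := by
    rw [hreveq]
    exact ofList_items _ (by rw [PySem.List.map_fst_enumerate]
                             exact PySem.List.nodup_pyRange_one _ _)
  have hrevnodup : rev.keys.Nodup := by
    simp only [PySem.Dict.keys]
    rw [hrevitems, PySem.List.map_fst_enumerate]
    exact PySem.List.nodup_pyRange_one _ _
  have henum : ∀ (p t : List Int) (x : Int), R = p ++ x :: t →
      (((p.length : Int)), x) ∈ PySem.List.enumerate R 0 := by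
    intro p t x hR
    rw [hR, PySem.List.enumerate_append, PySem.List.enumerate_cons]
    refine List.mem_append_right _ ?_
    simp
  have hordP : ∀ (p t : List Int) (x : Int), R = p ++ x :: t →
      ord.getD x 0 = (p.length : Int) := by
    intro p t x hR
    have hm : (x, ((p.length : Int))) ∈ ord.items := by
      rw [horditems, hLdef]
      have := List.mem_map_of_mem (f := fun p : Int × Int => (p.2, p.1)) (henum p t x hR)
      simpa using this
    exact PySem.Dict.getD_of_mem_items ord hm hordnodup 0
  have hrevP : ∀ (p t : List Int) (x : Int), R = p ++ x :: t →
      rev.getD ((p.length : Int)) 0 = x := by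
    intro p t x hR
    have hm : (((p.length : Int)), x) ∈ rev.items := by
      rw [hrevitems]
      exact henum p t x hR
    exact PySem.Dict.getD_of_mem_items rev hm hrevnodup 0
  have hordIdx : ∀ (i : Nat) (hi : i < R.length), ord.getD R[i] 0 = (i : Int) := by
    intro i hi
    have hdecomp : R = R.take i ++ R[i] :: R.drop (i + 1) := by
      rw [List.getElem_cons_drop]
      exact (List.take_append_drop i R).symm
    have := hordP (R.take i) (R.drop (i + 1)) R[i] hdecomp
    rwa [List.length_take, min_eq_left (le_of_lt hi)] at this
  have hd0items : d0.items = PySem.List.enumerate preferred 0 := by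
    rw [hd0def]
    exact ofList_items _ (by rw [PySem.List.map_fst_enumerate]
                             exact PySem.List.nodup_pyRange_one _ _)
  have hkeys0 : d0.keys = PySem.List.pyRange 0 n := by
    simp only [PySem.Dict.keys]
    rw [hd0items, PySem.List.map_fst_enumerate]
    simp [hndef]
  have hfperm : (R.filter (fun x => decide (n ≤ x))).Perm (PySem.List.pyRange n m) :=
    filter_perm_range R n m hn0 hRperm
  have hadd : PySem.List.sorted (PySem.List.pyRange n m) (fun pos => ord.getD pos 0) false
      = R.filter (fun x => decide (n ≤ x)) := by
    apply PySem.List.sorted_eq_of_perm_of_pairwise_lt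
    · exact hfperm
    · apply List.Pairwise.filter
      rw [List.pairwise_iff_getElem]
      intro i j hi hj hij
      rw [hordIdx i (lt_trans hij hj), hordIdx j hj]
      exact_mod_cast hij
  have hloop := loop_eq ord rev n R hRnodup hordP hrevP hRnn R [] d0 0 rfl
    (by rw [hkeys0]; simp)
    (fun _ => rfl)
    (fun h => absurd rfl h)
  have hkeysfin : ((R.foldl (fun (s : PySem.Dict Int Int × Int) pos =>
        if s.1.contains pos then (s.1, s.1.getD pos 0) else (s.1.insert pos s.2, s.2)) (d0, 0)).1).keys
      = PySem.List.pyRange 0 n ++ R.filter (fun x => decide (n ≤ x)) := by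
    have h2 := hloop.2
    simpa using h2
  set dfin : PySem.Dict Int Int := (R.foldl (fun (s : PySem.Dict Int Int × Int) pos =>
        if s.1.contains pos then (s.1, s.1.getD pos 0) else (s.1.insert pos s.2, s.2)) (d0, 0)).1
    with hdfin
  have hkeysnodup : dfin.keys.Nodup := by
    rw [hkeysfin]
    refine List.nodup_append.2 ⟨PySem.List.nodup_pyRange_one 0 n, hRnodup.filter _, ?_⟩
    intro a ha b hb
    have h1 := (PySem.List.mem_pyRange_one.1 ha).2
    have h2 : n ≤ b := by
      have := List.of_mem_filter hb
      simpa using this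
    omega
  have hkperm : dfin.keys.Perm (PySem.List.pyRange 0 (max n m)) := by
    rw [hkeysfin, ← range_append_max n m hn0]
    exact List.Perm.append_left _ hfperm
  have hsortedkeys : PySem.List.sorted dfin.keys (fun k => k) false
      = PySem.List.pyRange 0 (max n m) :=
    PySem.List.sorted_eq_of_perm_of_pairwise_lt _ _ _ hkperm.symm
      (PySem.List.pairwise_lt_pyRange_one 0 (max n m))
  have hitemsfin : dfin.items = dfin.keys.map (fun k => (k, dfin.getD k 0)) :=
    PySem.Dict.items_eq_map_keys dfin hkeysnodup 0
  have hsorted2 : PySem.List.sorted2 dfin.items (fun p => p.1) (fun p => p.2) false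
      = (PySem.List.pyRange 0 (max n m)).map (fun k => (k, dfin.getD k 0)) := by
    rw [hitemsfin, sorted2_map_fst]
    apply PySem.List.sorted_eq_of_perm_of_pairwise_lt
    · exact hkperm.symm.map _
    · rw [List.pairwise_map]
      exact (PySem.List.pairwise_lt_pyRange_one 0 (max n m)).imp (fun h => h)
  rw [hadd, hloop.1, hsorted2, hsortedkeys, List.map_map]
  rfl

-- ===== VERDICT (by name: the statement is the Claim_ definition above) =====
theorem order_list2_spec : Claim_equal_order_list2 := by
  intro preferred secondary _
  unfold Spec_order_list2
  exact main_eq preferred secondary
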